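-- pv_equiv track=rewrite | github.com/fxy1018/Leetcode | 816_AmbiguousCoordinates.py | helpFun
-- ===== SOURCE A (Python) =====
-- def helpFun(string, memo):
--     if len(string) == 1:
--         return([string])
--
--     if string in memo:
--         return(memo[string])
--
--     l = len(string)
--     res = []
--     #consider four situation
--     if string[0] == "0" and string[-1]=="0":
--         res = []
--     elif string[0] == "0" and string[-1]!="0":
--         res = [string[0] + "." + string[1:]]
--     elif string[0] != "0" and string[-1] == "0":
--         res = [string]
--     else:
--         res.append(string)
--         for i in range(1, l):
--             res.append(string[:i] + "." + string[i:])
--     memo[string] = res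
--     return(res)
-- ===== SOURCE B (Python) =====
-- def _ok_int(s):
--     # integer piece is valid iff it is "0" or has no leading zero
--     return s == "0" or s[0] != "0"
--
-- def helpFun(string, memo):
--     if len(string) == 1:
--         return [string]
--     if string in memo:
--         return memo[string]
--     res = [string] if _ok_int(string) else []
--     for i in range(1, len(string)):
--         intp, frac = string[:i], string[i:]
--         if _ok_int(intp) and not frac.endswith("0"):
--             res.append(intp + "." + frac)
--     memo[string] = res
--     return res
-- ===== Notes on version B (the rewrite author's own statement) =====
-- stated objective: alternative
-- what changed: B replaces A's four-way case analysis on the first and last character by a uniform generate-then-filter pass: it enumerates the whole string plus every dot placement and keeps those passing a single validity predicate (integer part '0' or no leading zero, fraction not ending in '0').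
import Mathlib
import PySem

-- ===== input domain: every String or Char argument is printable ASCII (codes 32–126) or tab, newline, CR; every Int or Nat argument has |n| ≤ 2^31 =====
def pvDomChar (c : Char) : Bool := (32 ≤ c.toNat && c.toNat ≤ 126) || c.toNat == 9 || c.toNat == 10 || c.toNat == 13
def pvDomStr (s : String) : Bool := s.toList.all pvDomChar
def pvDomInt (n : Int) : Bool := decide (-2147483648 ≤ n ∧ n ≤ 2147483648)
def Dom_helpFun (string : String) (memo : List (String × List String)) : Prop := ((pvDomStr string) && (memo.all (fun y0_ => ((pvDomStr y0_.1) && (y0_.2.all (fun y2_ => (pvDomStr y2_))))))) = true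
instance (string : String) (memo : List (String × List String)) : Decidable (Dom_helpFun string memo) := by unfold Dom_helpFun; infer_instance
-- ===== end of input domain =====

-- B replaces A's four-way first/last-char case analysis by a generate-then-filter pass over all
-- dot placements (objective: alternative decomposition, same cost); the equivalence is about the
-- RETURN value only — both Pythons also write memo[string] in place, a side effect not modelled here.

-- ===== PORT A =====
-- the else-branch of A (reached when len(string) != 1 and string is not a memo key)
def pvAcore (string : String) : List String :=
  let cs := string.toList
  let l : Int := cs.length
  match PySem.List.pyGet? cs 0, PySem.List.pyGet? cs (-1) with
  | some c0, some cl =>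
    if c0 = '0' ∧ cl = '0' then
      []
    else if c0 = '0' ∧ cl ≠ '0' then
      [String.ofList ([c0] ++ ['.'] ++ PySem.List.slice cs (some 1) none)]
    else if c0 ≠ '0' ∧ cl = '0' then
      [string]
    else
      (PySem.List.pyRange 1 l 1).foldl
        (fun res i =>
          res ++ [String.ofList (PySem.List.slice cs none (some i) ++ '.' :: PySem.List.slice cs (some i) none)])
        [string]
  | _, _ => []  -- string[0] / string[-1] raise IndexError on "" (excluded by Pre_)

def helpFun (string : String) (memo : List (String × List String)) : List String :=
  if PySem.Str.len string = 1 then [string]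
  else
    match PySem.Dict.get? (PySem.Dict.mk memo) string with
    | some v => v
    | none => pvAcore string

-- ===== PORT B =====
-- _ok_int: s == "0" or s[0] != "0" (Python raises IndexError on ""; unreachable under Pre_, fallback false)
def pvOkInt (s : List Char) : Bool :=
  s == ['0'] || (match s with | [] => false | c :: _ => c != '0')

-- the else-branch of B: generate every dot placement, keep the valid ones
def pvBcore (string : String) : List String :=
  let cs := string.toList
  let init := if pvOkInt cs then [string] else []
  (PySem.List.pyRange 1 (cs.length : Int) 1).foldl
    (fun res i =>
      let intp := PySem.List.slice cs none (some i)
      let frac := PySem.List.slice cs (some i) none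
      if pvOkInt intp && !(PySem.Chars.endswith frac ['0']) then
        res ++ [String.ofList (intp ++ '.' :: frac)]
      else res)
    init

def helpFun_alt (string : String) (memo : List (String × List String)) : List String :=
  if PySem.Str.len string = 1 then [string]
  else
    match PySem.Dict.get? (PySem.Dict.mk memo) string with
    | some v => v
    | none => pvBcore string

-- ===== PRECONDITION & SPEC =====
-- Pre_ excludes the empty string when it is not a memo key: there string[0] raises IndexError in A (and B raises too).
def Pre_helpFun (string : String) (memo : List (String × List String)) : Prop :=
  string ≠ "" ∨ (PySem.Dict.get? (PySem.Dict.mk memo) string).isSome = true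
instance (string : String) (memo : List (String × List String)) : Decidable (Pre_helpFun string memo) := by unfold Pre_helpFun; infer_instance
def pvWitness_helpFun : String × (List (String × List String)) := ("100", [])

def Spec_helpFun (string : String) (memo : List (String × List String)) (out : List String) : Prop := out = helpFun_alt string memo
instance (string : String) (memo : List (String × List String)) (out : List String) : Decidable (Spec_helpFun string memo out) := by unfold Spec_helpFun; infer_instance

-- ===== CLAIM (what is proved, stated in full; the proofs are below) =====
def Claim_equal_helpFun : Prop := ∀ (string : String) (memo : List (String × List String)), Dom_helpFun string memo → Pre_helpFun string memo → Spec_helpFun string memo (helpFun string memo)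

-- ===== LEMMAS AND PROOFS =====

lemma suffix_singleton_iff (ys : List Char) (a : Char) : [a] <:+ ys ↔ ys.getLast? = some a := by
  constructor
  · rintro ⟨t, rfl⟩; simp
  · intro h
    have hne : ys ≠ [] := by rintro rfl; simp at h
    refine ⟨ys.dropLast, ?_⟩
    have h2 := List.dropLast_concat_getLast hne
    rw [List.getLast?_eq_some_getLast hne, Option.some_inj] at h
    rw [h] at h2; exact h2

lemma endswith_drop_zero (cs : List Char) (k : Nat) (hk : k < cs.length) :
    PySem.Chars.endswith (cs.drop k) ['0'] = true ↔ cs.getLast? = some '0' := by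
  rw [PySem.Chars.endswith_iff, suffix_singleton_iff, List.getLast?_drop, if_neg (by omega)]

lemma foldl_const {α β : Type} (l : List α) (init : β) (f : β → α → β)
    (h : ∀ res : β, ∀ x ∈ l, f res x = res) : l.foldl f init = init := by
  induction l generalizing init with
  | nil => rfl
  | cons x xs ih =>
    rw [List.foldl_cons, h _ x (by simp)]
    exact ih _ (fun res y hy => h res y (by simp [hy]))

lemma okInt_take_of_zero_head (c0 : Char) (rest : List Char) (hrest : rest ≠ []) (k : Nat)
    (hc : c0 = '0') : pvOkInt ((c0 :: rest).take k) = decide (k = 1) := by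
  cases k with
  | zero => simp [pvOkInt]
  | succ k' =>
    subst hc
    by_cases hk' : k' = 0
    · subst hk'; simp [pvOkInt]
    · have ht : rest.take k' ≠ [] := by
        rw [Ne, List.take_eq_nil_iff]
        rintro (h | h)
        exacts [hk' h, hrest h]
      simp [pvOkInt, List.take_succ_cons, ht, hk']

lemma okInt_take_of_ne_zero_head (c0 : Char) (rest : List Char) (k : Nat) (hk : 1 ≤ k)
    (hc : c0 ≠ '0') : pvOkInt ((c0 :: rest).take k) = true := by
  obtain ⟨k', rfl⟩ : ∃ k', k = k' + 1 := ⟨k - 1, by omega⟩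
  simp [pvOkInt, List.take_succ_cons, hc]

lemma okInt_long (c0 : Char) (rest : List Char) (hrest : rest ≠ []) :
    pvOkInt (c0 :: rest) = (c0 != '0') := by
  simp [pvOkInt, hrest]

lemma core_eq (s : String) (h2 : 2 ≤ s.toList.length) : pvAcore s = pvBcore s := by
  obtain ⟨c0, rest, hcs⟩ : ∃ c0 rest, s.toList = c0 :: rest := by
    cases h : s.toList with
    | nil => rw [h] at h2; simp at h2
    | cons a t => exact ⟨a, t, rfl⟩
  have hrest : rest ≠ [] := by
    rintro rfl; rw [hcs] at h2; simp at h2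
  have hne : s.toList ≠ [] := by rw [hcs]; simp
  have hget0 : PySem.List.pyGet? s.toList 0 = some c0 := by
    rw [hcs]; simp [PySem.List.pyGet?, PySem.List.pyIdx?]
  have hlast : PySem.List.pyGet? s.toList (-1) = some (s.toList.getLast hne) := by
    rw [PySem.List.pyGet?_neg_one, List.getLast?_eq_some_getLast]
  have hlen : s.toList.length = rest.length + 1 := by rw [hcs]; simp
  have hL? : s.toList.getLast? = some (s.toList.getLast hne) := List.getLast?_eq_some_getLast hne
  simp only [pvAcore, pvBcore, hget0, hlast]
  by_cases h0 : c0 = '0' <;> by_cases hl : s.toList.getLast hne = '0'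
  · -- leading and trailing zero: both []
    rw [if_pos ⟨h0, hl⟩]
    have hinit : pvOkInt s.toList = false := by
      rw [hcs, okInt_long c0 rest hrest, h0]; simp
    rw [hinit]
    simp only [Bool.false_eq_true, if_false]
    rw [foldl_const]
    intro res i hi
    rw [PySem.List.mem_pyRange_one] at hi
    rw [PySem.List.slice_from s.toList (by omega : (0:Int) ≤ i)]
    rw [if_neg]
    have he : PySem.Chars.endswith (s.toList.drop i.toNat) ['0'] = true := by
      rw [endswith_drop_zero _ _ (by omega), hL?, hl]
    simp [he]
  · -- leading zero, nonzero tail: exactly one placement "0.rest"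
    rw [if_neg (by rintro ⟨-, h⟩; exact hl h), if_pos ⟨h0, hl⟩]
    have hinit : pvOkInt s.toList = false := by
      rw [hcs, okInt_long c0 rest hrest, h0]; simp
    rw [hinit]
    simp only [Bool.false_eq_true, if_false]
    have hlt : (1 : Int) < (s.toList.length : Int) := by rw [hlen]; push_cast; omega
    rw [PySem.List.pyRange_one_cons hlt, List.foldl_cons]
    rw [PySem.List.slice_to s.toList (by norm_num : (0:Int) ≤ 1),
        PySem.List.slice_from s.toList (by norm_num : (0:Int) ≤ 1)]
    have hok1 : pvOkInt (List.take (1:Int).toNat s.toList) = true := by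
      rw [hcs]; simp [pvOkInt, h0]
    have hend : PySem.Chars.endswith (List.drop (1:Int).toNat s.toList) ['0'] = false := by
      rw [Bool.eq_false_iff, Ne,
          endswith_drop_zero _ _ (by have := List.length_pos_iff.mpr hrest; omega), hL?]
      simp [hl]
    rw [if_pos (by rw [hok1, hend]; rfl)]
    rw [foldl_const]
    · rw [hcs]; simp
    · intro res i hi
      rw [PySem.List.mem_pyRange_one] at hi
      rw [PySem.List.slice_to s.toList (by omega : (0:Int) ≤ i)]
      rw [if_neg]
      have hok : pvOkInt (List.take i.toNat s.toList) = false := by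
        rw [hcs, okInt_take_of_zero_head c0 rest hrest i.toNat h0]
        simp; omega
      simp [hok]
  · -- nonzero head, trailing zero: only the whole string survives
    rw [if_neg (by rintro ⟨h, -⟩; exact h0 h), if_neg (by rintro ⟨h, -⟩; exact h0 h),
        if_pos ⟨h0, hl⟩]
    have hinit : pvOkInt s.toList = true := by
      rw [hcs, okInt_long c0 rest hrest]; simp [h0]
    rw [hinit]
    simp only [if_true]
    rw [foldl_const]
    intro res i hi
    rw [PySem.List.mem_pyRange_one] at hi
    rw [PySem.List.slice_from s.toList (by omega : (0:Int) ≤ i)]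
    rw [if_neg]
    have he : PySem.Chars.endswith (s.toList.drop i.toNat) ['0'] = true := by
      rw [endswith_drop_zero _ _ (by omega), hL?, hl]
    simp [he]
  · -- nonzero head and tail: every placement is kept
    rw [if_neg (by rintro ⟨h, -⟩; exact h0 h), if_neg (by rintro ⟨h, -⟩; exact h0 h),
        if_neg (by rintro ⟨-, h⟩; exact hl h)]
    have hinit : pvOkInt s.toList = true := by
      rw [hcs, okInt_long c0 rest hrest]; simp [h0]
    rw [hinit]
    simp only [if_true]
    apply PySem.List.foldl_congr_mem
    intro res i hi
    rw [PySem.List.mem_pyRange_one] at hi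
    rw [if_pos]
    have hok : pvOkInt (PySem.List.slice s.toList none (some i)) = true := by
      rw [PySem.List.slice_to s.toList (by omega : (0:Int) ≤ i), hcs]
      exact okInt_take_of_ne_zero_head c0 rest i.toNat (by omega) h0
    have hend : PySem.Chars.endswith (PySem.List.slice s.toList (some i) none) ['0'] = false := by
      rw [PySem.List.slice_from s.toList (by omega : (0:Int) ≤ i)]
      rw [Bool.eq_false_iff, Ne, endswith_drop_zero _ _ (by omega), hL?]
      simp [hl]
    rw [hok, hend]; rfl

-- ===== VERDICT (by name: the statement is the Claim_ definition above) =====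
theorem helpFun_spec : Claim_equal_helpFun := by
  intro string memo _hdom hpre
  unfold Spec_helpFun helpFun helpFun_alt
  by_cases h1 : PySem.Str.len string = 1
  · rw [if_pos h1, if_pos h1]
  · rw [if_neg h1, if_neg h1]
    cases hmem : PySem.Dict.get? (PySem.Dict.mk memo) string with
    | some v => rfl
    | none =>
      apply core_eq
      have hne : string ≠ "" := by
        rcases hpre with h | h
        · exact h
        · rw [hmem] at h; simp at h
      have hne' : string.toList ≠ [] := by simpa using hne
      have hlen1 : (string.toList.length : Int) ≠ 1 := by
        rw [PySem.Str.len_eq] at h1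
        exact h1
      have := List.length_pos_iff.mpr hne'
      omega
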